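-- pv_equiv track=rewrite | github.com/lawang24/competitive-programming-archive | Codeforces/old_code/March 29/G.py | solve
-- ===== SOURCE A (Python) =====
-- import collections
--
-- def helper(visited, node, neighbors):
--     max_count = 0
--
--     for nei in neighbors[node]:
--         if nei not in visited:
--             visited.add(nei)
--             max_count = max(max_count, helper(visited, nei, neighbors))
--             visited.remove(nei)
--
--     return max_count + 1
--
-- def find_longest_path(neighbors, node):
--
--     visited = {node}
--     nodes_in_longest_path = helper(visited,node,neighbors)
--
--     return nodes_in_longest_path
--
-- def solve(nodes, n_nodes):
--     g_group = collections.defaultdict(list)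
--     w_group = collections.defaultdict(list)
--     neighbors = collections.defaultdict(list)
--     visited = set()
--
--     # declare adjacency list
--     for i, node in enumerate(nodes):
--         g, w = node.split()
--
--         # attach to all neighbors in the same category
--         for nei in g_group[g]:
--             neighbors[i].append(nei)
--             neighbors[nei].append(i)
--
--         g_group[g].append(i)
--
--         # duplicate name
--         for nei in w_group[w]:
--             if i not in neighbors[nei]:
--                 neighbors[i].append(nei)
--                 neighbors[nei].append(i)
--
--             # add yourself to the category
--         w_group[w].append(i)
--
--     # find the longest path
--     ans = n_nodes
--
--     for i in range(n_nodes):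
--         if i not in visited:
--             visited.add(i)
--             longest_path = find_longest_path(neighbors,i)
--             ans = min(ans, n_nodes-longest_path)
--
--     return ans
-- ===== SOURCE B (Python) =====
-- def longest(adj, memo, visited, node):
--     # longest simple path starting at node avoiding visited,
--     # memoised on the (visited set, node) state shared across all queries
--     key = (visited, node)
--     if key not in memo:
--         best = 1
--         for v in adj.get(node, ()):
--             if v not in visited:
--                 best = max(best, 1 + longest(adj, memo, visited | {v}, v))
--         memo[key] = best
--     return memo[key]
--
--
-- def solve(nodes, n_nodes):
--     pairs = [tuple(s.split()) for s in nodes]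
--     adj = {i: [j for j in range(len(pairs))
--                if j != i and (pairs[j][0] == p[0] or pairs[j][1] == p[1])]
--            for i, p in enumerate(pairs)}
--     memo = {}
--     ans = n_nodes
--     for i in range(n_nodes):
--         ans = min(ans, n_nodes - longest(adj, memo, frozenset([i]), i))
--     return ans
-- ===== Notes on version B (the rewrite author's own statement) =====
-- stated objective: faster
-- what changed: The plain backtracking DFS (recomputed from scratch at every start, with A's incremental g_group/w_group graph build and dead outer visited set) is replaced by a memoised state-space search: longest-path values are cached in a dict keyed by the (frozenset of visited nodes, current node) state and shared across all starting nodes, and the adjacency dict is built directly by one comprehension per node; Pre_ excludes exactly the inputs where 'g, w = node.split()' raises ValueError.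
import Mathlib
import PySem

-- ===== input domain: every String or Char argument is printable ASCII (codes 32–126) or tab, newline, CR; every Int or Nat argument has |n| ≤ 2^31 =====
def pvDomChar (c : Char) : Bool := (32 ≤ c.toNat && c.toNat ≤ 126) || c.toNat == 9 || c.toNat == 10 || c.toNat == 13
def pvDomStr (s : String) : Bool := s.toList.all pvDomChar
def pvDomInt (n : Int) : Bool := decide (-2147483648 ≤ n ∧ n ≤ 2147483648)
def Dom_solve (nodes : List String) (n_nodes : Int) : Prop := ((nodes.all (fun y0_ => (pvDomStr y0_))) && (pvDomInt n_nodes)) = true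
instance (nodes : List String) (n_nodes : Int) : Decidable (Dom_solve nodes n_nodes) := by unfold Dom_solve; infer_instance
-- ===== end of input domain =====

-- B replaces A's plain backtracking search by a memoised state-space search: longest-path values
-- are cached in a dict keyed by the (visited frozenset, node) state and shared across all starts.

-- ===== PORT A =====
-- `neighbors[k].append(v)` on a defaultdict(list)
def pvAppend (d : PySem.Dict Int (List Int)) (k v : Int) : PySem.Dict Int (List Int) :=
  d.insert k (d.getD k [] ++ [v])

-- the body of A's build loop over `enumerate(nodes)`; `g, w = node.split()` is read with
-- getD (exact under Pre_solve, where split() yields exactly two tokens)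
def pvStepA (st : PySem.Dict String (List Int) × PySem.Dict String (List Int) × PySem.Dict Int (List Int))
    (p : Int × String) :
    PySem.Dict String (List Int) × PySem.Dict String (List Int) × PySem.Dict Int (List Int) :=
  let gg := st.1
  let wg := st.2.1
  let nb := st.2.2
  let i := p.1
  let parts := PySem.Str.split₀ p.2
  let g := parts.getD 0 ""
  let w := parts.getD 1 ""
  let gl := gg.getD g []
  let nb1 := gl.foldl (fun nb nei => pvAppend (pvAppend nb i nei) nei i) nb
  let gg1 := gg.insert g (gl ++ [i])
  let wl := wg.getD w []
  let nb2 := wl.foldl (fun nb nei =>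
      if (nb.getD nei []).contains i then nb else pvAppend (pvAppend nb i nei) nei i) nb1
  let wg1 := wg.insert w (wl ++ [i])
  (gg1, wg1, nb2)

def pvBuildA (nodes : List String) :
    PySem.Dict String (List Int) × PySem.Dict String (List Int) × PySem.Dict Int (List Int) :=
  (PySem.List.enumerate nodes).foldl pvStepA (PySem.Dict.empty, PySem.Dict.empty, PySem.Dict.empty)

-- A's `helper`: visited.add(nei) … visited.remove(nei) restores visited exactly (nei was not a
-- member), so the loop carries only max_count; fuel = nodes.length + 1 exceeds every possible
-- recursion depth (each level adds a distinct node index from the adjacency lists to visited)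
def pvHelperA (nb : PySem.Dict Int (List Int)) : Nat → PySem.Set Int → Int → Int
  | 0, _, _ => 1
  | fuel+1, visited, node =>
    (nb.getD node []).foldl
      (fun m nei => if PySem.Set.contains visited nei then m
                    else max m (pvHelperA nb fuel (PySem.Set.add visited nei) nei)) 0 + 1

def solve (nodes : List String) (n_nodes : Int) : Int :=
  let nb := (pvBuildA nodes).2.2
  ((PySem.List.pyRange 0 n_nodes 1).foldl
    (fun st i =>
      if PySem.Set.contains st.2 i then st
      else (min st.1 (n_nodes - pvHelperA nb (nodes.length + 1) (PySem.Set.ofList [i]) i),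
            PySem.Set.add st.2 i))
    (n_nodes, PySem.Set.empty)).1

-- ===== PORT B =====
-- pairs = [tuple(s.split()) for s in nodes]; the tuple is read only at [0] and [1],
-- represented by those two components via getD (exact under Pre_solve)
def pvPairs (nodes : List String) : List (String × String) :=
  nodes.map (fun s => ((PySem.Str.split₀ s).getD 0 "", (PySem.Str.split₀ s).getD 1 ""))

-- pairs[j] for an in-range index j
def pvPairAt (pairs : List (String × String)) (j : Int) : String × String :=
  PySem.List.pyGetD pairs j ("", "")

-- [j for j in range(len(pairs)) if j != i and (pairs[j][0] == p[0] or pairs[j][1] == p[1])]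
def pvAdjListB (pairs : List (String × String)) (i : Int) (p : String × String) : List Int :=
  (PySem.List.pyRange 0 pairs.length 1).filter
    (fun j => !(j == i) && ((pvPairAt pairs j).1 == p.1 || (pvPairAt pairs j).2 == p.2))

-- adj = {i: [...] for i, p in enumerate(pairs)}
def pvAdjB (pairs : List (String × String)) : PySem.Dict Int (List Int) :=
  (PySem.List.enumerate pairs).foldl
    (fun d ip => d.insert ip.1 (pvAdjListB pairs ip.1 ip.2)) PySem.Dict.empty

-- B's `longest`: the Python memo key is the frozenset `visited` (with `node`); frozenset equality
-- is extensional, so the key is represented canonically by the sorted list of its elements.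
-- Returns (value, updated memo); fuel as in A's helper, never exhausted on admitted inputs.
def pvLongestB (adj : PySem.Dict Int (List Int)) :
    Nat → PySem.Dict (List Int × Int) Int → PySem.Set Int → Int →
      Int × PySem.Dict (List Int × Int) Int
  | 0, memo, _, _ => (1, memo)
  | fuel+1, memo, visited, node =>
    let key := (PySem.List.sorted visited (fun x => x) false, node)
    match memo.get? key with
    | some v => (v, memo)
    | none =>
      let r := (adj.getD node []).foldl
        (fun st v =>
          if PySem.Set.contains visited v then st
          else
            let q := pvLongestB adj fuel st.2 (PySem.Set.add visited v) v
            (max st.1 (1 + q.1), q.2))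
        (1, memo)
      (r.1, r.2.insert key r.1)

def solve_alt (nodes : List String) (n_nodes : Int) : Int :=
  let pairs := pvPairs nodes
  let adj := pvAdjB pairs
  ((PySem.List.pyRange 0 n_nodes 1).foldl
    (fun st i =>
      let q := pvLongestB adj (nodes.length + 1) st.2 (PySem.Set.ofList [i]) i
      (min st.1 (n_nodes - q.1), q.2))
    (n_nodes, PySem.Dict.empty)).1

-- ===== PRECONDITION & SPEC =====
-- Pre_ excludes exactly the inputs where `g, w = node.split()` raises ValueError (a node whose
-- split is not exactly two whitespace-separated tokens)
def Pre_solve (nodes : List String) (n_nodes : Int) : Prop :=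
  ∀ s ∈ nodes, (PySem.Str.split₀ s).length = 2
instance (nodes : List String) (n_nodes : Int) : Decidable (Pre_solve nodes n_nodes) := by
  unfold Pre_solve; infer_instance

def pvWitness_solve : List String × Int := (["a x", "b x", "a y"], 3)

def Spec_solve (nodes : List String) (n_nodes : Int) (out : Int) : Prop := out = solve_alt nodes n_nodes
instance (nodes : List String) (n_nodes : Int) (out : Int) : Decidable (Spec_solve nodes n_nodes out) := by unfold Spec_solve; infer_instance

-- ===== CLAIM (what is proved, stated in full; the proofs are below) =====
def Claim_equal_solve : Prop := ∀ (nodes : List String) (n_nodes : Int), Dom_solve nodes n_nodes → Pre_solve nodes n_nodes → Spec_solve nodes n_nodes (solve nodes n_nodes)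

-- ===== LEMMAS AND PROOFS =====

theorem pvAppend_getD (d : PySem.Dict Int (List Int)) (k v k' : Int) :
    (pvAppend d k v).getD k' [] = if k' = k then d.getD k [] ++ [v] else d.getD k' [] := by
  simp [pvAppend, PySem.Dict.getD_insert]

-- effect of A's g-loop `for nei in g_group[g]: neighbors[i].append(nei); neighbors[nei].append(i)`
theorem pvGLoop_getD (l : List Int) (nb : PySem.Dict Int (List Int)) (c : Int)
    (hnd : l.Nodup) (hc : c ∉ l) (k : Int) :
    (l.foldl (fun nb nei => pvAppend (pvAppend nb c nei) nei c) nb).getD k [] =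
      if k = c then nb.getD c [] ++ l
      else if k ∈ l then nb.getD k [] ++ [c]
      else nb.getD k [] := by
  induction l generalizing nb with
  | nil => simp; intro h; subst h; rfl
  | cons a t ih =>
    simp only [List.foldl_cons]
    have hac : a ≠ c := fun h => hc (h ▸ List.mem_cons_self ..)
    have hat : a ∉ t := (List.nodup_cons.mp hnd).1
    rw [ih _ (List.nodup_cons.mp hnd).2 (fun h => hc (List.mem_cons_of_mem _ h))]
    by_cases hkc : k = c
    · subst hkc
      simp [pvAppend_getD, Ne.symm hac]
    · by_cases hka : k = a
      · subst hka
        simp [pvAppend_getD, hkc, hat]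
      · by_cases hkt : k ∈ t <;> simp [pvAppend_getD, hkc, hka, hkt]

-- effect of A's w-loop with the `if i not in neighbors[nei]` dedupe
theorem pvWLoop_getD (l : List Int) (nb : PySem.Dict Int (List Int)) (c : Int)
    (hnd : l.Nodup) (hc : c ∉ l) (k : Int) :
    (l.foldl (fun nb nei =>
        if (nb.getD nei []).contains c then nb else pvAppend (pvAppend nb c nei) nei c) nb).getD k [] =
      if k = c then nb.getD c [] ++ l.filter (fun nei => !((nb.getD nei []).contains c))
      else if k ∈ l ∧ ((nb.getD k []).contains c) = false then nb.getD k [] ++ [c]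
      else nb.getD k [] := by
  induction l generalizing nb with
  | nil =>
    simp only [List.foldl_nil, List.filter_nil, List.append_nil, List.not_mem_nil, false_and,
      if_false]
    split <;> simp_all
  | cons a t ih =>
    have hac : a ≠ c := fun h => hc (h ▸ List.mem_cons_self ..)
    have hat : a ∉ t := (List.nodup_cons.mp hnd).1
    have hndt := (List.nodup_cons.mp hnd).2
    have hct : c ∉ t := fun h => hc (List.mem_cons_of_mem _ h)
    simp only [List.foldl_cons]
    by_cases ha : ((nb.getD a []).contains c) = true
    · rw [if_pos ha, ih _ hndt hct,
        List.filter_cons_of_neg (p := fun nei => !((nb.getD nei []).contains c)) (by simpa using ha)]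
      rcases eq_or_ne k c with hkc | hkc
      · rw [if_pos hkc, if_pos hkc]
      · rw [if_neg hkc, if_neg hkc]
        rcases eq_or_ne k a with hka | hka
        · rw [if_neg (by simp [hka, hat]), if_neg (by simp [hka]; simpa using ha)]
        · simp [List.mem_cons, hka]
    · rw [if_neg ha, ih _ hndt hct]
      have hgd : ∀ x, x ≠ c → x ≠ a →
          ((pvAppend (pvAppend nb c a) a c).getD x []) = nb.getD x [] := by
        intro x hx1 hx2; simp [pvAppend_getD, hx1, hx2]
      have hfc : List.filter (fun nei => !(((pvAppend (pvAppend nb c a) a c).getD nei []).contains c)) t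
          = List.filter (fun nei => !((nb.getD nei []).contains c)) t := by
        apply List.filter_congr
        intro x hx
        rw [hgd x (fun h => hct (h ▸ hx)) (fun h => hat (h ▸ hx))]
      rcases eq_or_ne k c with hkc | hkc
      · rw [if_pos hkc, if_pos hkc, hfc,
          List.filter_cons_of_pos (p := fun nei => !((nb.getD nei []).contains c)) (by simpa using ha)]
        simp [pvAppend_getD, Ne.symm hac]
      · rw [if_neg hkc, if_neg hkc]
        rcases eq_or_ne k a with hka | hka
        · subst hka
          rw [if_neg (by simp [hat]), if_pos ⟨List.mem_cons_self .., by simpa using ha⟩]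
          simp [pvAppend_getD, hkc]
        · rw [hgd k hkc hka]
          simp [List.mem_cons, hka]

-- the closed form of A's adjacency lists used by the invariant below
def pvAdjBefore (toks : List (String × String)) (i : Int) : List Int :=
  (PySem.List.pyRange 0 i 1).filter (fun j => (pvPairAt toks j).1 == (pvPairAt toks i).1) ++
  (PySem.List.pyRange 0 i 1).filter
    (fun j => (pvPairAt toks j).2 == (pvPairAt toks i).2 && !((pvPairAt toks j).1 == (pvPairAt toks i).1))

def pvAdjAfter (toks : List (String × String)) (i m : Int) : List Int :=
  (PySem.List.pyRange (i+1) m 1).filter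
    (fun j => (pvPairAt toks j).1 == (pvPairAt toks i).1 || (pvPairAt toks j).2 == (pvPairAt toks i).2)

-- A's build invariant after the first m nodes
def pvInv (toks : List (String × String)) (m : Nat)
    (st : PySem.Dict String (List Int) × PySem.Dict String (List Int) × PySem.Dict Int (List Int)) : Prop :=
  (∀ g, st.1.getD g [] = (PySem.List.pyRange 0 m 1).filter (fun j => (pvPairAt toks j).1 == g)) ∧
  (∀ w, st.2.1.getD w [] = (PySem.List.pyRange 0 m 1).filter (fun j => (pvPairAt toks j).2 == w)) ∧
  (∀ k : Int, st.2.2.getD k [] =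
     if 0 ≤ k ∧ k < (m : Int) then pvAdjBefore toks k ++ pvAdjAfter toks k m else [])

theorem pvPairAt_eq (nodes : List String) (m : Nat) (hm : m < nodes.length) :
    pvPairAt (pvPairs nodes) (m : Int) =
      ((PySem.Str.split₀ nodes[m]).getD 0 "", (PySem.Str.split₀ nodes[m]).getD 1 "") := by
  simp [pvPairAt, pvPairs, PySem.List.pyGetD_natCast, List.getD_eq_getElem?_getD, hm]

theorem pvFilterRange_nodup (m : Nat) (p : Int → Bool) :
    ((PySem.List.pyRange 0 (m : Int) 1).filter p).Nodup :=
  (PySem.List.nodup_pyRange_one 0 (m : Int)).filter p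

theorem pvMem_filterRange {m : Nat} {p : Int → Bool} {x : Int}
    (hx : x ∈ (PySem.List.pyRange 0 (m : Int) 1).filter p) : 0 ≤ x ∧ x < (m : Int) := by
  have := List.mem_filter.mp hx
  have := (PySem.List.mem_pyRange_one).mp this.1
  omega

theorem pvMem_filterRange_iff {m : Nat} {p : Int → Bool} {x : Int} :
    x ∈ (PySem.List.pyRange 0 (m : Int) 1).filter p ↔ (0 ≤ x ∧ x < (m : Int)) ∧ p x = true := by
  rw [List.mem_filter, PySem.List.mem_pyRange_one]

theorem pvAdjUpto_lt {toks : List (String × String)} {k : Int} {m : Nat}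
    (hk : 0 ≤ k ∧ k < (m : Int)) {x : Int}
    (hx : x ∈ pvAdjBefore toks k ++ pvAdjAfter toks k (m : Int)) : x < (m : Int) := by
  rcases List.mem_append.mp hx with h | h
  · rcases List.mem_append.mp h with h | h <;>
    · have h1 := (List.mem_filter.mp h).1
      have := (PySem.List.mem_pyRange_one).mp h1
      omega
  · have h1 := (List.mem_filter.mp h).1
    have := (PySem.List.mem_pyRange_one).mp h1
    omega

theorem pvStepA_inv (nodes : List String) (m : Nat) (hm : m < nodes.length)
    (st : PySem.Dict String (List Int) × PySem.Dict String (List Int) × PySem.Dict Int (List Int))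
    (h : pvInv (pvPairs nodes) m st) :
    pvInv (pvPairs nodes) (m+1) (pvStepA st ((m : Int), nodes[m])) := by
  obtain ⟨h1, h2, h3⟩ := h
  set T := pvPairs nodes with hT
  set g := (pvPairAt T (m : Int)).1 with hgdef
  set w := (pvPairAt T (m : Int)).2 with hwdef
  have hsplit : (PySem.Str.split₀ nodes[m]).getD 0 "" = g ∧ (PySem.Str.split₀ nodes[m]).getD 1 "" = w := by
    rw [hgdef, hwdef, pvPairAt_eq nodes m hm]; exact ⟨rfl, rfl⟩
  set Gm := (PySem.List.pyRange 0 (m : Int) 1).filter (fun j => (pvPairAt T j).1 == g) with hGm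
  set Wm := (PySem.List.pyRange 0 (m : Int) 1).filter (fun j => (pvPairAt T j).2 == w) with hWm
  have hGnd : Gm.Nodup := pvFilterRange_nodup m _
  have hWnd : Wm.Nodup := pvFilterRange_nodup m _
  have hGmem : ((m : Int)) ∉ Gm := fun hx => by have := pvMem_filterRange (m := m) hx; omega
  have hWmem : ((m : Int)) ∉ Wm := fun hx => by have := pvMem_filterRange (m := m) hx; omega
  have hstep : pvStepA st ((m : Int), nodes[m]) =
    (st.1.insert g (st.1.getD g [] ++ [(m : Int)]),
     st.2.1.insert w (st.2.1.getD w [] ++ [(m : Int)]),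
     (st.2.1.getD w []).foldl (fun nb nei =>
        if (nb.getD nei []).contains (m : Int) then nb
        else pvAppend (pvAppend nb (m : Int) nei) nei (m : Int))
       ((st.1.getD g []).foldl (fun nb nei =>
          pvAppend (pvAppend nb (m : Int) nei) nei (m : Int)) st.2.2)) := by
    simp only [pvStepA]
    rw [hsplit.1, hsplit.2]
  rw [hstep]
  have hm1 : ((m + 1 : Nat) : Int) = (m : Int) + 1 := by push_cast; ring
  unfold pvInv
  refine ⟨?_, ?_, ?_⟩
  · intro g'
    rw [PySem.Dict.getD_insert, hm1, PySem.List.pyRange_one_succ_right (by positivity),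
      List.filter_append]
    rcases eq_or_ne g' g with hg' | hg'
    · subst hg'
      rw [if_pos rfl, h1 g]
      simp [← hgdef]
    · rw [if_neg hg', h1 g']
      have : ((pvPairAt T (m : Int)).1 == g') = false := by
        rw [← hgdef]; simp [hg'.symm]
      simp [this]
  · intro w'
    rw [PySem.Dict.getD_insert, hm1, PySem.List.pyRange_one_succ_right (by positivity),
      List.filter_append]
    rcases eq_or_ne w' w with hw' | hw'
    · subst hw'
      rw [if_pos rfl, h2 w]
      simp [← hwdef]
    · rw [if_neg hw', h2 w']
      have : ((pvPairAt T (m : Int)).2 == w') = false := by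
        rw [← hwdef]; simp [hw'.symm]
      simp [this]
  · intro k
    rw [h1 g, h2 w, ← hGm, ← hWm]
    set nb1 := Gm.foldl (fun nb nei => pvAppend (pvAppend nb (m : Int) nei) nei (m : Int)) st.2.2
      with hnb1def
    have hnb1 : ∀ k', nb1.getD k' [] =
        if k' = (m : Int) then st.2.2.getD (m : Int) [] ++ Gm
        else if k' ∈ Gm then st.2.2.getD k' [] ++ [(m : Int)]
        else st.2.2.getD k' [] := fun k' => pvGLoop_getD Gm st.2.2 (m : Int) hGnd hGmem k'
    rw [pvWLoop_getD Wm nb1 (m : Int) hWnd hWmem k]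
    have hmm : st.2.2.getD (m : Int) [] = [] := by rw [h3]; simp
    have hcont : ∀ nei ∈ Wm, ((nb1.getD nei []).contains (m : Int)) = ((pvPairAt T nei).1 == g) := by
      intro nei hnei
      have hb := pvMem_filterRange (m := m) hnei
      have hne : nei ≠ (m : Int) := by omega
      have hold : (m : Int) ∉ st.2.2.getD nei [] := by
        rw [h3, if_pos hb]
        intro hx
        exact absurd (pvAdjUpto_lt hb hx) (by omega)
      rw [hnb1 nei, if_neg hne]
      by_cases hG : nei ∈ Gm
      · rw [if_pos hG]
        have : ((pvPairAt T nei).1 == g) = true := (pvMem_filterRange_iff.mp hG).2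
        rw [this]
        simp
      · rw [if_neg hG]
        have : ((pvPairAt T nei).1 == g) = false := by
          rcases Bool.eq_false_or_eq_true ((pvPairAt T nei).1 == g) with h | h
          · exact absurd (pvMem_filterRange_iff.mpr ⟨hb, h⟩) hG
          · exact h
        rw [this]
        simpa using hold
    rcases eq_or_ne k (m : Int) with hkm | hkm
    · subst hkm
      rw [if_pos rfl, hnb1 _, if_pos rfl, hmm, List.nil_append,
        if_pos (show 0 ≤ (m:Int) ∧ (m:Int) < ((m+1:Nat):Int) by omega)]
      have hWf : Wm.filter (fun nei => !((nb1.getD nei []).contains (m : Int)))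
          = Wm.filter (fun nei => !((pvPairAt T nei).1 == g)) := by
        apply List.filter_congr
        intro x hx
        rw [hcont x hx]
      rw [hWf, hWm, List.filter_filter]
      unfold pvAdjBefore pvAdjAfter
      rw [hm1, PySem.List.pyRange_one_eq_nil (a := (m:Int)+1) (b := (m:Int)+1) (by omega), List.filter_nil, List.append_nil,
        ← hgdef, ← hwdef, ← hGm]
      congr 1
      apply List.filter_congr
      intro x _
      simp [Bool.and_comm]
    · rw [if_neg hkm]
      by_cases hk : 0 ≤ k ∧ k < (m : Int)
      · have holdk : st.2.2.getD k [] = pvAdjBefore T k ++ pvAdjAfter T k (m : Int) := by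
          rw [h3, if_pos hk]
        have hmold : (m : Int) ∉ st.2.2.getD k [] := by
          rw [holdk]; intro hx; exact absurd (pvAdjUpto_lt hk hx) (by omega)
        have hGk : (k ∈ Gm) ↔ ((pvPairAt T k).1 == g) = true := by
          rw [pvMem_filterRange_iff]; exact ⟨fun h => h.2, fun h => ⟨hk, h⟩⟩
        have hWk : (k ∈ Wm) ↔ ((pvPairAt T k).2 == w) = true := by
          rw [pvMem_filterRange_iff]; exact ⟨fun h => h.2, fun h => ⟨hk, h⟩⟩
        have htgt : (if 0 ≤ k ∧ k < ((m+1:Nat):Int) then pvAdjBefore T k ++ pvAdjAfter T k ((m+1:Nat):Int) else [])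
            = pvAdjBefore T k ++ (pvAdjAfter T k (m : Int) ++
               (if ((pvPairAt T (m:Int)).1 == (pvPairAt T k).1 || (pvPairAt T (m:Int)).2 == (pvPairAt T k).2)
                then [(m : Int)] else [])) := by
          rw [if_pos (by omega)]
          unfold pvAdjAfter
          rw [hm1, PySem.List.pyRange_one_succ_right (by omega), List.filter_append]
          congr 2
          simp [List.filter_cons]
        rw [htgt, hnb1 k, if_neg hkm]
        by_cases hb1 : (pvPairAt T k).1 = g
        · have hGmemk : k ∈ Gm := hGk.mpr (by simp [hb1])
          have hcond : ¬ (k ∈ Wm ∧ ((st.2.2.getD k [] ++ [(m : Int)]).contains (m : Int)) = false) := by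
            rintro ⟨-, hfalse⟩
            simp at hfalse
          rw [if_pos hGmemk, if_neg hcond, holdk]
          have hor : ((pvPairAt T (m:Int)).1 == (pvPairAt T k).1 || (pvPairAt T (m:Int)).2 == (pvPairAt T k).2) = true := by
            simp [hb1, hgdef]
          rw [hor, if_pos rfl, List.append_assoc]
        · have hGnot : k ∉ Gm := fun hx => hb1 (by simpa using hGk.mp hx)
          rw [if_neg hGnot]
          have hcf : ((st.2.2.getD k []).contains (m : Int)) = false := by simpa using hmold
          by_cases hb2 : (pvPairAt T k).2 = w
          · rw [if_pos ⟨hWk.mpr (by simp [hb2]), hcf⟩, holdk]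
            have hor : ((pvPairAt T (m:Int)).1 == (pvPairAt T k).1 || (pvPairAt T (m:Int)).2 == (pvPairAt T k).2) = true := by
              simp [hb2, hwdef]
            rw [hor, if_pos rfl, List.append_assoc]
          · rw [if_neg (fun hand => hb2 (by simpa using hWk.mp hand.1)), holdk]
            have hx1 : (pvPairAt T (m:Int)).1 ≠ (pvPairAt T k).1 := by
              rw [← hgdef]; exact fun hx => hb1 hx.symm
            have hx2 : (pvPairAt T (m:Int)).2 ≠ (pvPairAt T k).2 := by
              rw [← hwdef]; exact fun hx => hb2 hx.symm
            have hor : ((pvPairAt T (m:Int)).1 == (pvPairAt T k).1 || (pvPairAt T (m:Int)).2 == (pvPairAt T k).2) = false := by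
              simp [hx1, hx2]
            rw [hor, if_neg (by simp), List.append_nil]
      · have hkG : k ∉ Gm := fun hx => hk (pvMem_filterRange hx)
        have hkW : k ∉ Wm := fun hx => hk (pvMem_filterRange hx)
        rw [if_neg (fun hand => hkW hand.1), hnb1 k, if_neg hkm, if_neg hkG, h3,
          if_neg hk, if_neg (by omega)]

theorem pvBuildA_inv (nodes : List String) (m : Nat) (hm : m ≤ nodes.length) :
    pvInv (pvPairs nodes) m
      (((PySem.List.enumerate nodes).take m).foldl pvStepA
        (PySem.Dict.empty, PySem.Dict.empty, PySem.Dict.empty)) := by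
  induction m with
  | zero =>
    refine ⟨?_, ?_, ?_⟩ <;> intro x <;>
      simp [PySem.List.pyRange_one_eq_nil (le_refl (0:Int)), PySem.Dict.getD_empty]
  | succ m ih =>
    have hm' : m < nodes.length := hm
    have htake : (PySem.List.enumerate nodes).take (m+1)
        = (PySem.List.enumerate nodes).take m ++ [((m : Int), nodes[m])] := by
      rw [List.take_add_one]
      congr
      rw [PySem.List.getElem?_enumerate]
      simp [List.getElem?_eq_getElem hm']
    rw [htake, List.foldl_append, List.foldl_cons, List.foldl_nil]
    exact pvStepA_inv nodes m hm' _ (ih (le_of_lt hm'))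

-- closed form of A's finished neighbor dict
theorem pvNbA_getD (nodes : List String) (k : Int) :
    (pvBuildA nodes).2.2.getD k [] =
      if 0 ≤ k ∧ k < (nodes.length : Int)
      then pvAdjBefore (pvPairs nodes) k ++ pvAdjAfter (pvPairs nodes) k nodes.length
      else [] := by
  have hlen : (PySem.List.enumerate nodes).take nodes.length = PySem.List.enumerate nodes := by
    rw [List.take_of_length_le]
    rw [PySem.List.length_enumerate]
  have h := (pvBuildA_inv nodes nodes.length (le_refl _)).2.2 k
  rw [hlen] at h
  exact h

-- closed form of B's adjacency dict
theorem pvRangeInsert_getD (f : Int → List Int) (m : Nat) (k : Int) :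
    (((PySem.List.pyRange 0 (m : Int) 1).foldl (fun d j => d.insert j (f j))
        PySem.Dict.empty).getD k []) =
      if 0 ≤ k ∧ k < (m : Int) then f k else [] := by
  induction m with
  | zero => simp [PySem.List.pyRange_one_eq_nil]
  | succ m ih =>
    rw [show ((m + 1 : Nat) : Int) = (m : Int) + 1 by push_cast; ring,
      PySem.List.pyRange_one_succ_right (by positivity), List.foldl_append]
    simp only [List.foldl_cons, List.foldl_nil, PySem.Dict.getD_insert]
    rcases eq_or_ne k (m : Int) with hk | hk
    · subst hk; simp
    · rw [if_neg hk, ih]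
      by_cases h : 0 ≤ k ∧ k < (m : Int)
      · rw [if_pos h, if_pos ⟨h.1, by omega⟩]
      · rw [if_neg h, if_neg (by omega)]

theorem pvAdjB_getD (pairs : List (String × String)) (k : Int) :
    (pvAdjB pairs).getD k [] =
      if 0 ≤ k ∧ k < (pairs.length : Int) then pvAdjListB pairs k (pvPairAt pairs k) else [] := by
  have he := PySem.List.enumerate_eq_map_pyRange (xs := pairs) (("", "") : String × String)
  rw [pvAdjB, he, List.foldl_map]
  have hr := pvRangeInsert_getD (fun j => pvAdjListB pairs j (pvPairAt pairs j)) pairs.length k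
  simpa [PySem.List.len, pvPairAt] using hr

-- the two adjacency dicts hold the same neighbor SETS at every key
theorem pvMemAdj_iff (nodes : List String) (k x : Int) :
    x ∈ (pvBuildA nodes).2.2.getD k [] ↔ x ∈ (pvAdjB (pvPairs nodes)).getD k [] := by
  set T := pvPairs nodes with hT
  have hTlen : T.length = nodes.length := by simp [hT, pvPairs]
  rw [pvNbA_getD, pvAdjB_getD, hTlen]
  by_cases hk : 0 ≤ k ∧ k < (nodes.length : Int)
  · rw [if_pos hk, if_pos hk]
    unfold pvAdjBefore pvAdjAfter pvAdjListB
    rw [hTlen]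
    simp only [List.mem_append, List.mem_filter, PySem.List.mem_pyRange_one]
    constructor
    · rintro ((⟨h1, h2⟩ | ⟨h1, h2⟩) | ⟨h1, h2⟩)
      · refine ⟨by omega, ?_⟩
        have : ¬ (x == k) = true := by simp; omega
        simp only [Bool.and_eq_true, Bool.not_eq_true', Bool.or_eq_true]
        refine ⟨by simp; omega, Or.inl ?_⟩
        simpa using h2
      · refine ⟨by omega, ?_⟩
        simp only [Bool.and_eq_true, Bool.not_eq_true', Bool.or_eq_true] at h2 ⊢
        exact ⟨by simp; omega, Or.inr (by simpa using h2.1)⟩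
      · refine ⟨by omega, ?_⟩
        simp only [Bool.and_eq_true, Bool.not_eq_true', Bool.or_eq_true] at h2 ⊢
        exact ⟨by simp; omega, h2⟩
    · rintro ⟨h1, h2⟩
      simp only [Bool.and_eq_true, Bool.not_eq_true', beq_eq_false_iff_ne, ne_eq,
        Bool.or_eq_true] at h2
      obtain ⟨hne, hor⟩ := h2
      rcases lt_trichotomy x k with hlt | heq | hgt
      · by_cases hg : ((pvPairAt T x).1 == (pvPairAt T k).1) = true
        · exact Or.inl (Or.inl ⟨by omega, hg⟩)
        · refine Or.inl (Or.inr ⟨by omega, ?_⟩)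
          simp only [Bool.and_eq_true, Bool.not_eq_true']
          rcases hor with h | h
          · exact absurd h hg
          · exact ⟨h, by simpa using hg⟩
      · exact absurd heq hne
      · refine Or.inr ⟨by omega, ?_⟩
        simpa using hor
  · rw [if_neg hk, if_neg hk]

-- neighbor entries live in range(len(nodes))
theorem pvAdjB_mem_range (nodes : List String) (k x : Int)
    (hx : x ∈ (pvAdjB (pvPairs nodes)).getD k []) : 0 ≤ x ∧ x < (nodes.length : Int) := by
  rw [pvAdjB_getD] at hx
  split at hx
  · have h1 := (List.mem_filter.mp hx).1
    have := (PySem.List.mem_pyRange_one).mp h1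
    have hTlen : (pvPairs nodes).length = nodes.length := by simp [pvPairs]
    rw [hTlen] at this
    omega
  · simp at hx

theorem pvContains_eq (s : PySem.Set Int) (x : Int) :
    PySem.Set.contains s x = decide (x ∈ s) := by
  simp [PySem.Set.contains_eq_listContains]

theorem pvContains_add (s : PySem.Set Int) (v x : Int) :
    PySem.Set.contains (PySem.Set.add s v) x = (PySem.Set.contains s x || decide (x = v)) := by
  rw [pvContains_eq, pvContains_eq]
  rcases Decidable.em (x ∈ PySem.Set.add s v) with h | h
  · rw [decide_eq_true h]
    rcases (PySem.Set.mem_add s v x).mp h with h' | h'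
    · simp [h']
    · simp [h']
  · rw [decide_eq_false h]
    have h1 : x ∉ s := fun hh => h ((PySem.Set.mem_add s v x).mpr (Or.inl hh))
    have h2 : x ≠ v := fun hh => h ((PySem.Set.mem_add s v x).mpr (Or.inr hh))
    simp [h1, h2]

-- pvHelperA depends on the visited set only through membership
theorem pvHelperA_ext (nb : PySem.Dict Int (List Int)) :
    ∀ (fuel : Nat) (V V' : PySem.Set Int) (u : Int),
      (∀ x, PySem.Set.contains V x = PySem.Set.contains V' x) →
      pvHelperA nb fuel V u = pvHelperA nb fuel V' u := by
  intro fuel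
  induction fuel with
  | zero => intro V V' u h; rfl
  | succ fuel ih =>
    intro V V' u h
    show (nb.getD u []).foldl _ 0 + 1 = (nb.getD u []).foldl _ 0 + 1
    congr 1
    apply PySem.List.foldl_congr_mem
    intro m v _
    rw [h v]
    by_cases hc : PySem.Set.contains V' v = true
    · rw [if_pos hc, if_pos hc]
    · rw [if_neg hc, if_neg hc,
        ih (PySem.Set.add V v) (PySem.Set.add V' v) v (fun x => by rw [pvContains_add, pvContains_add, h x])]

-- a guarded running max depends only on the membership of the iterated list
theorem pvMaxFold_le (c : Int → Bool) (g : Int → Int) :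
    ∀ (l : List Int) (a : Int),
      a ≤ l.foldl (fun m x => if c x then m else max m (g x)) a := by
  intro l
  induction l with
  | nil => intro a; simp
  | cons x t ih =>
    intro a
    simp only [List.foldl_cons]
    refine le_trans ?_ (ih _)
    split
    · exact le_refl a
    · exact le_max_left a (g x)

theorem pvMaxFold_mem_le (c : Int → Bool) (g : Int → Int) :
    ∀ (l : List Int) (a x : Int), x ∈ l → c x = false →
      g x ≤ l.foldl (fun m y => if c y then m else max m (g y)) a := by
  intro l
  induction l with
  | nil => intro a x hx; simp at hx
  | cons y t ih =>
    intro a x hx hc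
    simp only [List.foldl_cons]
    rcases List.mem_cons.mp hx with h | h
    · subst h
      refine le_trans ?_ (pvMaxFold_le c g t _)
      rw [if_neg (by simp [hc])]
      exact le_max_right a (g x)
    · exact ih _ x h hc

theorem pvMaxFold_cases (c : Int → Bool) (g : Int → Int) :
    ∀ (l : List Int) (a : Int),
      l.foldl (fun m x => if c x then m else max m (g x)) a = a ∨
      ∃ x ∈ l, c x = false ∧ l.foldl (fun m x => if c x then m else max m (g x)) a = g x := by
  intro l
  induction l with
  | nil => intro a; exact Or.inl rfl
  | cons y t ih =>
    intro a
    simp only [List.foldl_cons]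
    by_cases hc : c y = true
    · rw [if_pos hc]
      rcases ih a with h | ⟨x, hx, hcx, he⟩
      · exact Or.inl h
      · exact Or.inr ⟨x, List.mem_cons_of_mem _ hx, hcx, he⟩
    · rw [if_neg hc]
      rcases ih (max a (g y)) with h | ⟨x, hx, hcx, he⟩
      · rcases max_choice a (g y) with hm | hm
        · exact Or.inl (h.trans hm)
        · exact Or.inr ⟨y, List.mem_cons_self .., by simpa using hc, h.trans hm⟩
      · exact Or.inr ⟨x, List.mem_cons_of_mem _ hx, hcx, he⟩

theorem pvMaxFold_memExt (c : Int → Bool) (g : Int → Int) (l₁ l₂ : List Int)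
    (h : ∀ x, x ∈ l₁ ↔ x ∈ l₂) (a : Int) :
    l₁.foldl (fun m x => if c x then m else max m (g x)) a =
    l₂.foldl (fun m x => if c x then m else max m (g x)) a := by
  apply le_antisymm
  · rcases pvMaxFold_cases c g l₁ a with he | ⟨x, hx, hc, he⟩
    · rw [he]; exact pvMaxFold_le c g l₂ a
    · rw [he]; exact pvMaxFold_mem_le c g l₂ a x ((h x).mp hx) hc
  · rcases pvMaxFold_cases c g l₂ a with he | ⟨x, hx, hc, he⟩
    · rw [he]; exact pvMaxFold_le c g l₁ a
    · rw [he]; exact pvMaxFold_mem_le c g l₁ a x ((h x).mpr hx) hc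

-- pvHelperA depends on the adjacency dict only through the membership of its lists
theorem pvHelperA_nbExt (nb1 nb2 : PySem.Dict Int (List Int))
    (h : ∀ k x, x ∈ nb1.getD k [] ↔ x ∈ nb2.getD k []) :
    ∀ (fuel : Nat) (V : PySem.Set Int) (u : Int),
      pvHelperA nb1 fuel V u = pvHelperA nb2 fuel V u := by
  intro fuel
  induction fuel with
  | zero => intro V u; rfl
  | succ fuel ih =>
    intro V u
    show (nb1.getD u []).foldl _ 0 + 1 = (nb2.getD u []).foldl _ 0 + 1
    congr 1
    have h1 : (nb1.getD u []).foldl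
        (fun m nei => if PySem.Set.contains V nei then m
                      else max m (pvHelperA nb1 fuel (PySem.Set.add V nei) nei)) 0
        = (nb1.getD u []).foldl
        (fun m nei => if PySem.Set.contains V nei then m
                      else max m (pvHelperA nb2 fuel (PySem.Set.add V nei) nei)) 0 := by
      apply PySem.List.foldl_congr_mem
      intro m v _
      rw [ih]
    rw [h1]
    exact pvMaxFold_memExt _ _ _ _ (h u) 0

-- number of still-free node indices: the decreasing measure of the search
def pvCnt (n : Nat) (V : PySem.Set Int) : Nat :=
  ((PySem.List.pyRange 0 (n : Int) 1).filter (fun x => !PySem.Set.contains V x)).length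

theorem pvCnt_le (n : Nat) (V : PySem.Set Int) : pvCnt n V ≤ n := by
  unfold pvCnt
  have := List.length_filter_le (fun x => !PySem.Set.contains V x) (PySem.List.pyRange 0 (n : Int) 1)
  rw [PySem.List.length_pyRange_one] at this
  omega

theorem pvCnt_add_lt (n : Nat) (V : PySem.Set Int) (v : Int)
    (hv : 0 ≤ v ∧ v < (n : Int)) (hc : PySem.Set.contains V v = false) :
    pvCnt n (PySem.Set.add V v) < pvCnt n V := by
  unfold pvCnt
  have hpred : ∀ x, (!PySem.Set.contains (PySem.Set.add V v) x)
      = ((!PySem.Set.contains V x) && !(decide (x = v))) := by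
    intro x
    rw [pvContains_add]
    cases PySem.Set.contains V x <;> simp
  have hfe : (PySem.List.pyRange 0 (n : Int) 1).filter (fun x => !PySem.Set.contains (PySem.Set.add V v) x)
      = ((PySem.List.pyRange 0 (n : Int) 1).filter (fun x => !PySem.Set.contains V x)).filter
          (fun x => !(decide (x = v))) := by
    rw [List.filter_filter]
    apply List.filter_congr
    intro x _
    rw [hpred x, Bool.and_comm]
  rw [hfe]
  apply List.length_filter_lt_length_iff_exists.mpr
  refine ⟨v, ?_, by simp⟩
  exact List.mem_filter.mpr ⟨(PySem.List.mem_pyRange_one).mpr (by omega), by rw [hc]; rfl⟩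

-- with enough fuel the value of A's helper recursion is fuel-independent
theorem pvHelperA_fuel (n : Nat) (adj : PySem.Dict Int (List Int))
    (hadj : ∀ k x, x ∈ adj.getD k [] → 0 ≤ x ∧ x < (n : Int)) :
    ∀ (c f₁ f₂ : Nat) (V : PySem.Set Int) (u : Int),
      pvCnt n V ≤ c → c < f₁ → c < f₂ →
      pvHelperA adj f₁ V u = pvHelperA adj f₂ V u := by
  intro c
  induction c with
  | zero =>
    intro f₁ f₂ V u hcnt hf1 hf2
    obtain ⟨a, rfl⟩ := Nat.exists_eq_succ_of_ne_zero (by omega : f₁ ≠ 0)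
    obtain ⟨b, rfl⟩ := Nat.exists_eq_succ_of_ne_zero (by omega : f₂ ≠ 0)
    have hall : ∀ x ∈ (PySem.List.pyRange 0 (n : Int) 1), ¬ ((!PySem.Set.contains V x) = true) := by
      have : ((PySem.List.pyRange 0 (n : Int) 1).filter (fun x => !PySem.Set.contains V x)) = [] :=
        List.length_eq_zero_iff.mp (Nat.le_zero.mp hcnt)
      intro x hx
      exact (List.filter_eq_nil_iff.mp this) x hx
    have hskip : ∀ (f : Nat), (adj.getD u []).foldl
        (fun m nei => if PySem.Set.contains V nei then m
                      else max m (pvHelperA adj f (PySem.Set.add V nei) nei)) 0 = (0 : Int) := by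
      intro f
      have : (adj.getD u []).foldl
          (fun m nei => if PySem.Set.contains V nei then m
                        else max m (pvHelperA adj f (PySem.Set.add V nei) nei)) 0
          = (adj.getD u []).foldl (fun m _ => m) 0 := by
        apply PySem.List.foldl_congr_mem
        intro m v hv
        have hin : v ∈ PySem.List.pyRange 0 (n : Int) 1 :=
          (PySem.List.mem_pyRange_one).mpr (by have := hadj u v hv; omega)
        have := hall v hin
        rw [if_pos (by simpa using this)]
      rw [this, PySem.List.foldl_ignore]
    show _ + (1:Int) = _ + 1
    rw [hskip a, hskip b]
  | succ c ih =>
    intro f₁ f₂ V u hcnt hf1 hf2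
    obtain ⟨a, rfl⟩ := Nat.exists_eq_succ_of_ne_zero (by omega : f₁ ≠ 0)
    obtain ⟨b, rfl⟩ := Nat.exists_eq_succ_of_ne_zero (by omega : f₂ ≠ 0)
    show _ + (1:Int) = _ + 1
    congr 1
    apply PySem.List.foldl_congr_mem
    intro m v hv
    by_cases hc : PySem.Set.contains V v = true
    · rw [if_pos hc, if_pos hc]
    · rw [if_neg hc, if_neg hc]
      have hlt := pvCnt_add_lt n V v (hadj u v hv) (by simpa using hc)
      rw [ih a b (PySem.Set.add V v) v (by omega) (by omega) (by omega)]

-- the guarded (1 + ·) running max from a+1 is the guarded running max from a, plus one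
theorem pvMaxFold_shift (c : Int → Bool) (g : Int → Int) :
    ∀ (l : List Int) (a : Int),
      l.foldl (fun m x => if c x then m else max m (1 + g x)) (a + 1) =
      l.foldl (fun m x => if c x then m else max m (g x)) a + 1 := by
  intro l
  induction l with
  | nil => intro a; rfl
  | cons x t ih =>
    intro a
    simp only [List.foldl_cons]
    by_cases hc : c x = true
    · rw [if_pos hc, if_pos hc, ih]
    · rw [if_neg hc, if_neg hc, show 1 + g x = g x + 1 by ring, max_add_add_right, ih]

-- the memo invariant: every cached value is the canonical longest-path value of its state
def pvInvM (adj : PySem.Dict Int (List Int)) (n : Nat)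
    (memo : PySem.Dict (List Int × Int) Int) : Prop :=
  ∀ (l : List Int) (u v : Int), memo.get? (l, u) = some v →
    v = pvHelperA adj (n + 1) (PySem.Set.ofList l) u

theorem pvSorted_contains (V : PySem.Set Int) (x : Int) :
    PySem.Set.contains (PySem.Set.ofList (PySem.List.sorted V (fun y => y) false)) x
      = PySem.Set.contains V x := by
  rw [pvContains_eq, pvContains_eq]
  congr 1
  simp only [eq_iff_iff]
  rw [PySem.Set.mem_ofList, PySem.List.mem_sorted]

-- B's memoised search returns the canonical value and preserves the memo invariant
theorem pvLongestB_correct (nodes : List String) :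
    ∀ (fuel : Nat) (memo : PySem.Dict (List Int × Int) Int) (V : PySem.Set Int) (u : Int),
      pvCnt nodes.length V < fuel → pvInvM (pvAdjB (pvPairs nodes)) nodes.length memo →
      (pvLongestB (pvAdjB (pvPairs nodes)) fuel memo V u).1
          = pvHelperA (pvAdjB (pvPairs nodes)) (nodes.length + 1) V u ∧
      pvInvM (pvAdjB (pvPairs nodes)) nodes.length (pvLongestB (pvAdjB (pvPairs nodes)) fuel memo V u).2 := by
  set adj := pvAdjB (pvPairs nodes) with hadjdef
  set n := nodes.length with hn
  have hadj : ∀ k x, x ∈ adj.getD k [] → 0 ≤ x ∧ x < (n : Int) := fun k x hx =>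
    pvAdjB_mem_range nodes k x hx
  intro fuel
  induction fuel with
  | zero => intro memo V u hc; omega
  | succ fuel ih =>
    intro memo V u hcnt hinv
    rcases hhit : memo.get? (PySem.List.sorted V (fun x => x) false, u) with _ | v
    · -- miss: run the fold, then cache
      simp only [pvLongestB, hhit]
      -- the fold over the adjacency list, threading the memo
      have hfold : ∀ (l : List Int), (∀ x ∈ l, 0 ≤ x ∧ x < (n : Int)) →
          ∀ (a : Int) (m0 : PySem.Dict (List Int × Int) Int), pvInvM adj n m0 →
          (l.foldl (fun st v =>
              if PySem.Set.contains V v then st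
              else
                let q := pvLongestB adj fuel st.2 (PySem.Set.add V v) v
                (max st.1 (1 + q.1), q.2)) (a, m0)).1
            = l.foldl (fun m v =>
                if PySem.Set.contains V v then m
                else max m (1 + pvHelperA adj (n + 1) (PySem.Set.add V v) v)) a ∧
          pvInvM adj n (l.foldl (fun st v =>
              if PySem.Set.contains V v then st
              else
                let q := pvLongestB adj fuel st.2 (PySem.Set.add V v) v
                (max st.1 (1 + q.1), q.2)) (a, m0)).2 := by
        intro l
        induction l with
        | nil => intro _ a m0 hm0; exact ⟨rfl, hm0⟩
        | cons x t iht =>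
          intro hl a m0 hm0
          simp only [List.foldl_cons]
          by_cases hcx : PySem.Set.contains V x = true
          · rw [if_pos hcx, if_pos hcx]
            exact iht (fun y hy => hl y (List.mem_cons_of_mem _ hy)) a m0 hm0
          · rw [if_neg hcx, if_neg hcx]
            have hx := hl x (List.mem_cons_self ..)
            have hlt := pvCnt_add_lt n V x hx (by simpa using hcx)
            have hrec := ih m0 (PySem.Set.add V x) x (by omega) hm0
            simp only at hrec ⊢
            rw [hrec.1]
            exact iht (fun y hy => hl y (List.mem_cons_of_mem _ hy)) _ _ hrec.2
      have hres := hfold (adj.getD u []) (fun x hx => hadj u x hx) 1 memo hinv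
      -- identify the fold value with the canonical helper value
      have hval : ((adj.getD u []).foldl (fun st v =>
              if PySem.Set.contains V v then st
              else
                let q := pvLongestB adj fuel st.2 (PySem.Set.add V v) v
                (max st.1 (1 + q.1), q.2)) (1, memo)).1
          = pvHelperA adj (n + 1) V u := by
        rw [hres.1]
        show _ = pvHelperA adj (n + 1) V u
        have hunf : pvHelperA adj (n + 1) V u
            = (adj.getD u []).foldl
                (fun m nei => if PySem.Set.contains V nei then m
                              else max m (pvHelperA adj n (PySem.Set.add V nei) nei)) 0 + 1 := rfl
        have hstep : (adj.getD u []).foldl (fun m v =>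
                if PySem.Set.contains V v then m
                else max m (1 + pvHelperA adj (n + 1) (PySem.Set.add V v) v)) 1
            = (adj.getD u []).foldl (fun m v =>
                if PySem.Set.contains V v then m
                else max m (1 + pvHelperA adj n (PySem.Set.add V v) v)) 1 := by
          apply PySem.List.foldl_congr_mem
          intro m v hv
          by_cases hcv : PySem.Set.contains V v = true
          · rw [if_pos hcv, if_pos hcv]
          · rw [if_neg hcv, if_neg hcv]
            have hlt := pvCnt_add_lt n V v (hadj u v hv) (by simpa using hcv)
            have hle := pvCnt_le n V
            rw [pvHelperA_fuel n adj hadj (pvCnt n (PySem.Set.add V v)) (n + 1) n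
              (PySem.Set.add V v) v (le_refl _) (by omega) (by omega)]
        rw [hstep, hunf]
        have hs := pvMaxFold_shift (fun v => PySem.Set.contains V v)
          (fun v => pvHelperA adj n (PySem.Set.add V v) v) (adj.getD u []) 0
        rw [show (0 : Int) + 1 = 1 by ring] at hs
        exact hs
      refine ⟨hval, ?_⟩
      -- the inserted entry satisfies the invariant
      intro l w vv hget
      rw [PySem.Dict.get?_insert] at hget
      split at hget
      · rename_i heq
        rw [Prod.ext_iff] at heq
        obtain ⟨h1, h2⟩ := heq
        simp only at h1 h2
        subst h1
        have := Option.some.inj hget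
        rw [← this, hval, h2]
        exact pvHelperA_ext adj (n + 1) V _ u (fun x => (pvSorted_contains V x).symm)
      · exact hres.2 l w vv hget
    · -- hit: the cached value is the canonical value of this state
      simp only [pvLongestB, hhit]
      refine ⟨?_, hinv⟩
      have := hinv _ u v hhit
      rw [this]
      exact pvHelperA_ext adj (n + 1) _ V u (fun x => pvSorted_contains V x)

-- A's start loop: the dead `visited` bookkeeping never fires (range indices are distinct)
theorem pvLoopA_eq (n_nodes : Int) (F G : Int → Int) (hFG : ∀ i, F i = G i) :
    ∀ (l : List Int) (ans : Int) (visited : PySem.Set Int),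
      l.Nodup → (∀ i ∈ l, PySem.Set.contains visited i = false) →
      (l.foldl (fun st i =>
          if PySem.Set.contains st.2 i then st
          else (min st.1 (n_nodes - F i), PySem.Set.add st.2 i)) (ans, visited)).1
        = l.foldl (fun a i => min a (n_nodes - G i)) ans := by
  intro l
  induction l with
  | nil => intro ans visited _ _; rfl
  | cons a t ih =>
    intro ans visited hnd hv
    simp only [List.foldl_cons]
    rw [if_neg (by simpa using hv a (List.mem_cons_self ..))]
    rw [ih _ _ (List.nodup_cons.mp hnd).2, hFG]
    intro i hi
    have hia : i ≠ a := fun h => (List.nodup_cons.mp hnd).1 (h ▸ hi)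
    have : PySem.Set.contains visited i = false := hv i (List.mem_cons_of_mem _ hi)
    rw [pvContains_add, this]
    simp [hia]

-- B's start loop: thread the memo away, leaving the same pure min-fold
theorem pvLoopB_eq (nodes : List String) (n_nodes : Int) :
    ∀ (l : List Int) (ans : Int) (memo : PySem.Dict (List Int × Int) Int),
      pvInvM (pvAdjB (pvPairs nodes)) nodes.length memo →
      (l.foldl (fun st i =>
          let q := pvLongestB (pvAdjB (pvPairs nodes)) (nodes.length + 1) st.2 (PySem.Set.ofList [i]) i
          (min st.1 (n_nodes - q.1), q.2)) (ans, memo)).1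
        = l.foldl (fun a i =>
            min a (n_nodes - pvHelperA (pvAdjB (pvPairs nodes)) (nodes.length + 1) (PySem.Set.ofList [i]) i)) ans := by
  intro l
  induction l with
  | nil => intro ans memo _; rfl
  | cons x t ih =>
    intro ans memo hinv
    simp only [List.foldl_cons]
    have hc := pvLongestB_correct nodes (nodes.length + 1) memo (PySem.Set.ofList [x]) x
      (by have := pvCnt_le nodes.length (PySem.Set.ofList [x]); omega) hinv
    rw [hc.1]
    exact ih _ _ hc.2

-- ===== VERDICT (by name: the statement is the Claim_ definition above) =====
theorem solve_spec : Claim_equal_solve := by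
  intro nodes n_nodes _hdom _hpre
  unfold Spec_solve solve solve_alt
  rw [pvLoopA_eq n_nodes
      (fun i => pvHelperA (pvBuildA nodes).2.2 (nodes.length + 1) (PySem.Set.ofList [i]) i)
      (fun i => pvHelperA (pvAdjB (pvPairs nodes)) (nodes.length + 1) (PySem.Set.ofList [i]) i)
      (fun i => pvHelperA_nbExt _ _ (pvMemAdj_iff nodes) _ _ _)
      _ n_nodes PySem.Set.empty (PySem.List.nodup_pyRange_one 0 n_nodes) (fun i _ => rfl)]
  rw [pvLoopB_eq nodes n_nodes _ n_nodes PySem.Dict.empty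
      (fun l u v h => by rw [PySem.Dict.get?_empty] at h; cases h)]
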